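-- pv_equiv track=rewrite | github.com/Tenzinyo/Dynamic_programming | sig_prep.py | solution
-- ===== SOURCE A (Python) =====
-- def solution(board, word):
--     row = len(board)
--     col = len(board[0])
--     n = len(word)
--     count = 0
--     if not board or not word:
--         return 0
--     for r in range(row):
--         row_str = "".join(board[r])
--         for i in range(len(row_str)-n+1):
--             if row_str[i:i+n] == word:
--                 count+=1
--     for c in range(col):
--         col_str = "".join(board[r][c] for r in range(row))
--         for j in range(len(col_str)-n+1):
--             if col_str[j:j+n]==word:
--                 count+=1
--     start = []
--     for r in range(row):
--         start.append((r,0))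
--     for c in range(1,col):
--         start.append((0,c))
--     for r,c in start:
--         diag = []
--         curr_r, curr_c = r,c
--         while curr_r<row and curr_c<col:
--             diag.append(board[curr_r][curr_c])
--             curr_r+=1
--             curr_c+=1
--         diag_str = "".join(diag)
--         for i in range(len(diag_str)-n+1):
--             if diag_str[i:i+n] == word:
--                 count+=1
--     return count
-- ===== SOURCE B (Python) =====
-- def count_at_suffixes(s, w):
--     total = 0
--     while s:
--         if s.startswith(w):
--             total += 1
--         s = s[1:]
--     return total
--
--
-- def solution(board, word):
--     if not board or not word:
--         return 0
--     nrows, ncols = len(board), len(board[0])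
--     lines = ["".join(r) for r in board]
--     lines += ["".join(t) for t in zip(*board)]
--     for d in range(-(nrows - 1), ncols):
--         lines.append("".join(board[r][r + d]
--                              for r in range(max(0, -d), min(nrows, ncols - d))))
--     return sum(count_at_suffixes(s, word) for s in lines)
-- ===== Notes on version B (the rewrite author's own statement) =====
-- stated objective: alternative
-- what changed: B builds the row lines, the column lines via a zip(*board) transpose and the diagonal lines via one offset-parametrised comprehension (instead of A's per-column index loops and per-start-cell while-walks), and counts matches with a startswith-at-every-suffix scan instead of A's slice-window comparisons over range(len-n+1).
import Mathlib
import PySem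

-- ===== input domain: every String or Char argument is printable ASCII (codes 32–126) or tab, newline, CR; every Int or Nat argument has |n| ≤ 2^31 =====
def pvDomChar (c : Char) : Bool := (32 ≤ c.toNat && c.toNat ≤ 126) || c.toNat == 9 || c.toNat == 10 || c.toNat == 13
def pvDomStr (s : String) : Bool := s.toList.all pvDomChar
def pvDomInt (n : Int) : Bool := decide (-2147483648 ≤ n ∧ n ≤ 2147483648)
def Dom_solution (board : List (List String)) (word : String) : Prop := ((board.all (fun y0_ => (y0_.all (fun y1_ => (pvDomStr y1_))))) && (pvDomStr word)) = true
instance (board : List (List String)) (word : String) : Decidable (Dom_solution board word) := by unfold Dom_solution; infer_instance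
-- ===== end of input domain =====

-- B counts word occurrences by a startswith-at-every-suffix scan over lines built with a
-- zip/transpose recursion and one offset-parametrised diagonal loop, instead of A's per-index
-- slice windows and start-cell while-walks; objective: alternative decomposition, same cost.

-- ===== PORT A =====
-- shared helper: Python's '"".join(cells)' on a list of cell strings, as a char list
def pvJoin (cells : List String) : List Char :=
  PySem.Chars.join [] (cells.map String.toList)

-- shared helper: board[r][c]; the default "" is never reached inside Pre_solution
def pvCell (board : List (List String)) (r c : Int) : String :=
  PySem.List.pyGetD (PySem.List.pyGetD board r []) c ""

-- A's inner loop: 'for i in range(len(line)-n+1): if line[i:i+n] == word: count += 1'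
def pvCountSlices (s w : List Char) (cnt : Int) : Int :=
  (PySem.List.pyRange 0 ((s.length : Int) - (w.length : Int) + 1) 1).foldl
    (fun c i => if PySem.List.slice s (some i) (some (i + (w.length : Int))) = w then c + 1 else c)
    cnt

-- A's 'while curr_r < row and curr_c < col: diag.append(board[curr_r][curr_c]); …'
def pvDiagWalk (board : List (List String)) (row col r c : Int) : List String :=
  if _h : r < row ∧ c < col then
    pvCell board r c :: pvDiagWalk board row col (r + 1) (c + 1)
  else []
termination_by (row - r).toNat
decreasing_by omega

def solution (board : List (List String)) (word : String) : Int :=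
  let row : Int := board.length
  let col : Int := (board.headD []).length   -- len(board[0]); Pre_solution excludes board = []
  let w : List Char := word.toList
  let count : Int := 0
  if board = [] ∨ w = [] then count
  else
    let count := (PySem.List.pyRange 0 row 1).foldl
      (fun cnt r => pvCountSlices (pvJoin (PySem.List.pyGetD board r [])) w cnt) count
    let count := (PySem.List.pyRange 0 col 1).foldl
      (fun cnt c =>
        pvCountSlices (pvJoin ((PySem.List.pyRange 0 row 1).map (fun r => pvCell board r c)))
          w cnt) count
    let start : List (Int × Int) :=
      (PySem.List.pyRange 0 row 1).foldl (fun acc r => acc ++ [(r, (0 : Int))]) []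
    let start := (PySem.List.pyRange 1 col 1).foldl (fun acc c => acc ++ [((0 : Int), c)]) start
    start.foldl
      (fun cnt rc => pvCountSlices (pvJoin (pvDiagWalk board row col rc.1 rc.2)) w cnt) count

-- ===== PORT B =====
-- B's helper: 'while s: if s.startswith(w): total += 1; s = s[1:]'
def pvCountSuffixes (s w : List Char) (total : Int) : Int :=
  match s with
  | [] => total
  | c :: rest =>
      pvCountSuffixes rest w (if PySem.Chars.startswith (c :: rest) w then total + 1 else total)

-- hand port of zip(*rows): tuples of the r-th cells, truncated at the shortest row (exact)
def pvZipStar (rows : List (List String)) : List (List String) :=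
  if _h : rows = [] ∨ rows.any (fun r => r.isEmpty) then []
  else (rows.map (fun r => r.headD "")) :: pvZipStar (rows.map (fun r => r.drop 1))
termination_by (rows.headD []).length
decreasing_by
  rcases rows with _ | ⟨a, t⟩
  · simp at _h
  · simp only [not_or, List.any_cons, Bool.or_eq_true, not_exists, List.any_eq_true] at _h
    rcases a with _ | ⟨x, a'⟩
    · simp at _h
    · simp

def solution_alt (board : List (List String)) (word : String) : Int :=
  if board = [] ∨ word.toList = [] then 0
  else
    let nrows : Int := board.length
    let ncols : Int := (board.headD []).length
    let w : List Char := word.toList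
    let lines : List (List Char) := board.map (fun r => pvJoin r)
    let lines := lines ++ (pvZipStar board).map (fun t => pvJoin t)
    let lines := (PySem.List.pyRange (-(nrows - 1)) ncols 1).foldl
      (fun acc d =>
        acc ++ [pvJoin ((PySem.List.pyRange (max 0 (-d)) (min nrows (ncols - d)) 1).map
          (fun r => pvCell board r (r + d)))]) lines
    (lines.map (fun s => pvCountSuffixes s w 0)).sum

-- ===== PRECONDITION & SPEC =====
-- Pre_ excludes exactly the inputs where A raises IndexError: the empty board (len(board[0])),
-- and, when word is nonempty, boards with some row shorter than row 0 (board[r][c] in the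
-- column/diagonal scans).
def Pre_solution (board : List (List String)) (word : String) : Prop :=
  board ≠ [] ∧ (word = "" ∨ ∀ rw ∈ board, (board.headD []).length ≤ rw.length)

instance (board : List (List String)) (word : String) : Decidable (Pre_solution board word) := by
  unfold Pre_solution; infer_instance

def pvWitness_solution : List (List String) × String := ([["a", "b"], ["c", "a"]], "a")

def Spec_solution (board : List (List String)) (word : String) (out : Int) : Prop :=
  out = solution_alt board word
instance (board : List (List String)) (word : String) (out : Int) :
    Decidable (Spec_solution board word out) := by unfold Spec_solution; infer_instance

-- ===== CLAIM (what is proved, stated in full; the proofs are below) =====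
def Claim_equal_solution : Prop := ∀ (board : List (List String)) (word : String),
  Dom_solution board word → Pre_solution board word →
  Spec_solution board word (solution board word)

-- ===== LEMMAS AND PROOFS =====

-- number of indices at which w occurs in s (the common specification of both counters)
def pvOcc (s w : List Char) : Int :=
  ((List.range s.length).countP (fun i => w.isPrefixOf (s.drop i)) : Int)

-- the diagonal line with offset d (column index minus row index), as B builds it
def pvLineD (board : List (List String)) (row col d : Int) : List Char :=
  pvJoin ((PySem.List.pyRange (max 0 (-d)) (min row (col - d)) 1).map
    (fun t => pvCell board t (t + d)))

theorem pvCountSuffixes_eq (s w : List Char) (t : Int) :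
    pvCountSuffixes s w t = t + pvOcc s w := by
  induction s generalizing t with
  | nil => simp [pvCountSuffixes, pvOcc]
  | cons c rest ih =>
    rw [pvCountSuffixes, ih]
    have h1 : ((List.range rest.length).countP
          ((fun i => w.isPrefixOf ((c :: rest).drop i)) ∘ (fun n => n + 1)))
        = (List.range rest.length).countP (fun i => w.isPrefixOf (rest.drop i)) := by
      apply List.countP_congr; intro i _; rfl
    have hocc : pvOcc (c :: rest) w
        = (if PySem.Chars.startswith (c :: rest) w then 1 else 0) + pvOcc rest w := by
      unfold pvOcc
      rw [show (c :: rest).length = rest.length + 1 from rfl, List.range_succ_eq_map,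
        List.countP_cons, List.countP_map, h1]
      by_cases h : w <+: (c :: rest)
      · simp [List.isPrefixOf_iff_prefix, PySem.Chars.startswith_iff, h]; ring
      · simp [List.isPrefixOf_iff_prefix, PySem.Chars.startswith_iff, h]
    rw [hocc]
    by_cases h : PySem.Chars.startswith (c :: rest) w <;> simp [h] <;> ring

theorem countP_range_extend (a b : Nat) (p : Nat → Bool) (hab : a ≤ b)
    (h : ∀ k, a ≤ k → k < b → p k = false) :
    (List.range b).countP p = (List.range a).countP p := by
  have hb : b = a + (b - a) := by omega
  rw [hb, List.range_add, List.countP_append]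
  have : (List.countP p ((List.range (b - a)).map fun x => a + x)) = 0 := by
    rw [List.countP_eq_zero]
    intro x hx
    simp only [List.mem_map, List.mem_range] at hx
    obtain ⟨k, hk, rfl⟩ := hx
    simp [h (a + k) (by omega) (by omega)]
  omega

theorem pvCountSlices_eq (s w : List Char) (hw : w ≠ []) (cnt : Int) :
    pvCountSlices s w cnt = cnt + pvOcc s w := by
  unfold pvCountSlices
  rw [PySem.List.pyRange_one, List.foldl_map]
  rw [PySem.List.foldl_ite_add_one
    (p := fun (k : Nat) => PySem.List.slice s (some (0 + (k:Int)))
      (some ((0 + (k:Int)) + (w.length : Int))) = w)]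
  have hq : ∀ k : Nat, (decide (PySem.List.slice s (some (0 + (k:Int)))
        (some ((0 + (k:Int)) + (w.length : Int))) = w))
      = w.isPrefixOf (s.drop k) := by
    intro k
    have h0 : ((0:Int) + (k:Int)) = (k:Int) := by ring
    rw [h0, PySem.List.slice_natCast_add, Bool.eq_iff_iff]
    simp only [decide_eq_true_eq, List.isPrefixOf_iff_prefix]
    constructor
    · intro h
      rw [List.prefix_iff_eq_take, ← h]
      congr 1
      rw [← h]
      simp [List.length_take]
    · intro h
      rw [List.prefix_iff_eq_take] at h
      rw [← h]
  unfold pvOcc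
  congr 2
  rw [List.countP_congr (fun k _ => by rw [hq k])]
  refine (countP_range_extend (((s.length : Int) - (w.length : Int) + 1 - 0).toNat) s.length
    (fun i => w.isPrefixOf (s.drop i)) (by have := List.length_pos_iff.mpr hw; omega) ?_).symm
  intro k hk1 hk2
  rw [← Bool.not_eq_true, List.isPrefixOf_iff_prefix]
  intro hpre
  have hlen := hpre.length_le
  simp only [List.length_drop] at hlen
  have := List.length_pos_iff.mpr hw
  omega

theorem pvZipStar_eq (k : Nat) (rows : List (List String)) (hne : rows ≠ [])
    (hall : ∀ rw ∈ rows, k ≤ rw.length) (hhd : (rows.headD []).length = k) :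
    pvZipStar rows = (List.range k).map (fun c => rows.map (fun rw => rw.getD c "")) := by
  induction k generalizing rows with
  | zero =>
    rw [pvZipStar, dif_pos]
    · simp
    · right
      rcases rows with _ | ⟨a, t⟩
      · simp at hne
      · simp only [List.headD_cons] at hhd
        simp [List.any_cons, List.eq_nil_of_length_eq_zero hhd]
  | succ k ih =>
    rw [pvZipStar, dif_neg]
    · rw [ih (rows.map (fun r => r.drop 1))]
      · rw [List.range_succ_eq_map, List.map_cons, List.map_map]
        congr 1
        · apply List.map_congr_left
          intro rw hrw
          have h1 : 1 ≤ rw.length := by have := hall rw hrw; omega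
          rcases rw with _ | ⟨x, t⟩
          · simp at h1
          · simp
        · apply List.map_congr_left
          intro c _
          rw [List.map_map]
          apply List.map_congr_left
          intro rw hrw
          have h1 : 1 ≤ rw.length := by have := hall rw hrw; omega
          rcases rw with _ | ⟨x, t⟩
          · simp at h1
          · simp
      · simp [hne]
      · intro rw' hrw'
        simp only [List.mem_map] at hrw'
        obtain ⟨rw, hrw, rfl⟩ := hrw'
        have := hall rw hrw
        simp only [List.length_drop]
        omega
      · rcases rows with _ | ⟨a, t⟩
        · simp at hne
        · simp only [List.headD_cons] at hhd ⊢
          simp only [List.map_cons, List.headD_cons, List.length_drop]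
          omega
    · rw [not_or]
      refine ⟨hne, ?_⟩
      simp only [List.any_eq_true, not_exists, not_and]
      intro rw hrw
      have := hall rw hrw
      simp only [List.isEmpty_iff, ← List.length_eq_zero_iff]
      omega

theorem pvDiagWalk_eq (board : List (List String)) (row col r c : Int)
    (hr : 0 ≤ r) (hc : 0 ≤ c) :
    pvDiagWalk board row col r c =
      (PySem.List.pyRange r (min row (col - (c - r))) 1).map
        (fun t => pvCell board t (t + (c - r))) := by
  rw [pvDiagWalk]
  split_ifs with h
  · rw [PySem.List.pyRange_one_cons (by omega), List.map_cons]
    congr 1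
    · congr 1
      omega
    · rw [pvDiagWalk_eq board row col (r+1) (c+1) (by omega) (by omega)]
      have : c + 1 - (r + 1) = c - r := by ring
      rw [this]
  · rw [PySem.List.pyRange_one_eq_nil (by omega)]
    simp
termination_by (row - r).toNat
decreasing_by omega

theorem pvLineD_of_col_nonpos (board : List (List String)) (row col d : Int)
    (hcol : col ≤ 0) : pvLineD board row col d = [] := by
  unfold pvLineD
  rw [PySem.List.pyRange_one_eq_nil (by omega)]
  rfl

theorem pvOcc_nil (w : List Char) : pvOcc [] w = 0 := by simp [pvOcc]

-- Σ pvOcc over the diagonal lines is the same in A's start-cell order and B's offset order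
theorem pvDiagSum_eq (board : List (List String)) (w : List Char) (row col : Int)
    (hrow : 1 ≤ row) :
    ((PySem.List.pyRange 0 row 1).map (fun r => pvOcc (pvLineD board row col (-r)) w)).sum
      + ((PySem.List.pyRange 1 col 1).map (fun c => pvOcc (pvLineD board row col c) w)).sum
    = ((PySem.List.pyRange (-(row - 1)) col 1).map
        (fun d => pvOcc (pvLineD board row col d) w)).sum := by
  by_cases hc0 : col ≤ 0
  · have hz : ∀ d, pvOcc (pvLineD board row col d) w = 0 := fun d => by
      rw [pvLineD_of_col_nonpos board row col d hc0, pvOcc_nil]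
    simp [hz, List.sum_eq_zero]
  · rw [PySem.List.pyRange_one_append (-(row - 1)) 1 col (by omega) (by omega),
      List.map_append, List.sum_append]
    congr 1
    have hrev : (PySem.List.pyRange 0 row 1).map (fun r => -r)
        = (PySem.List.pyRange (-(row - 1)) 1 1).reverse := by
      have h := PySem.List.pyRange_neg_one_eq_reverse 0 (-row)
      norm_num at h
      have e1 : -(row - 1) = -row + 1 := by ring
      rw [e1, ← h, PySem.List.pyRange_neg_one 0 (-row), PySem.List.pyRange_one 0 row]
      have e3 : (0 - -row).toNat = (row - 0).toNat := by omega
      rw [e3, List.map_map]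
      apply List.map_congr_left
      intro k _
      simp only [Function.comp_apply]
      omega
    have hcomp : (fun r : Int => pvOcc (pvLineD board row col (-r)) w)
        = (fun d => pvOcc (pvLineD board row col d) w) ∘ (fun r : Int => -r) := rfl
    rw [hcomp, ← List.map_map, hrev, List.map_reverse, List.sum_reverse]

-- ===== VERDICT (by name: the statement is the Claim_ definition above) =====
theorem solution_spec : Claim_equal_solution := by
  intro board word _hdom hpre
  unfold Spec_solution
  obtain ⟨hb, hrest⟩ := hpre
  by_cases hwe : word.toList = []
  · simp [solution, solution_alt, hwe]
  · have hall : ∀ rw ∈ board, (board.headD []).length ≤ rw.length := by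
      rcases hrest with h | h
      · exact absurd (by rw [h]; rfl) hwe
      · exact h
    have hg : ¬ (board = [] ∨ word.toList = []) := by tauto
    have hrow1 : 1 ≤ (board.length : Int) := by
      have := List.length_pos_iff.mpr hb; omega
    simp only [solution, solution_alt]
    rw [if_neg hg, if_neg hg]
    -- A's row loop is the sum of pvOcc over the joined rows
    have hRows : ∀ init : Int,
        (PySem.List.pyRange 0 (board.length : Int) 1).foldl
          (fun cnt r => pvCountSlices (pvJoin (PySem.List.pyGetD board r [])) word.toList cnt) init
        = init + (board.map (fun rw => pvOcc (pvJoin rw) word.toList)).sum := by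
      intro init
      rw [PySem.List.foldl_pyRange_zero_pyGetD' board []
        (fun acc rw => pvCountSlices (pvJoin rw) word.toList acc) init]
      rw [PySem.List.foldl_congr_mem board _
        (fun acc rw => acc + pvOcc (pvJoin rw) word.toList) init
        (fun acc rw _ => pvCountSlices_eq _ word.toList hwe acc)]
      exact PySem.List.foldl_add board _ init
    -- the c-th column A scans is the list of c-th cells of the rows
    have hline : ∀ c : Int,
        (PySem.List.pyRange 0 (board.length : Int) 1).map (fun r => pvCell board r c)
        = board.map (fun rw => PySem.List.pyGetD rw c "") := by
      intro c
      rw [show (fun r => pvCell board r c)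
          = (fun rw => PySem.List.pyGetD rw c "") ∘
            (fun j => PySem.List.pyGetD board j []) from rfl]
      rw [← List.map_map, PySem.List.map_pyGetD_pyRange_zero' board []]
    -- A's column loop is the sum of pvOcc over the joined columns
    have hCols : ∀ init : Int,
        (PySem.List.pyRange 0 ((board.headD []).length : Int) 1).foldl
          (fun cnt c => pvCountSlices
            (pvJoin ((PySem.List.pyRange 0 (board.length : Int) 1).map
              (fun r => pvCell board r c))) word.toList cnt) init
        = init + ((List.range (board.headD []).length).map
            (fun c => pvOcc (pvJoin (board.map (fun rw => rw.getD c ""))) word.toList)).sum := by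
      intro init
      rw [PySem.List.foldl_congr_mem _ _
        (fun cnt c => cnt +
          pvOcc (pvJoin (board.map (fun rw => PySem.List.pyGetD rw c ""))) word.toList) init
        (fun acc c _ => by rw [hline c, pvCountSlices_eq _ word.toList hwe])]
      rw [PySem.List.foldl_add]
      congr 1
      rw [PySem.List.pyRange_zero_nat, List.map_map]
      congr 1
      apply List.map_congr_left
      intro k _
      simp only [Function.comp_apply, PySem.List.pyGetD_natCast]
    -- A's start list
    have hStart :
        (PySem.List.pyRange 1 ((board.headD []).length : Int) 1).foldl
          (fun acc c => acc ++ [((0 : Int), c)])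
          ((PySem.List.pyRange 0 (board.length : Int) 1).foldl
            (fun acc r => acc ++ [(r, (0 : Int))]) [])
        = (PySem.List.pyRange 0 (board.length : Int) 1).map (fun r => (r, (0 : Int)))
          ++ (PySem.List.pyRange 1 ((board.headD []).length : Int) 1).map
              (fun c => ((0 : Int), c)) := by
      rw [PySem.List.foldl_append_singleton_eq_map, PySem.List.foldl_append_singleton_eq_map]
      simp
    -- each walked diagonal is the offset-d line
    have hWalk0 : ∀ r : Int, 0 ≤ r →
        pvJoin (pvDiagWalk board (board.length : Int) ((board.headD []).length : Int) r 0)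
        = pvLineD board (board.length : Int) ((board.headD []).length : Int) (0 - r) := by
      intro r hr
      rw [pvDiagWalk_eq board _ _ r 0 hr le_rfl]
      unfold pvLineD
      rw [show max 0 (-(0 - r)) = r from by omega]
    have hWalk1 : ∀ c : Int, 0 ≤ c →
        pvJoin (pvDiagWalk board (board.length : Int) ((board.headD []).length : Int) 0 c)
        = pvLineD board (board.length : Int) ((board.headD []).length : Int) (c - 0) := by
      intro c hc
      rw [pvDiagWalk_eq board _ _ 0 c le_rfl hc]
      unfold pvLineD
      rw [show max 0 (-(c - 0)) = 0 from by omega]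
    set row : Int := (board.length : Int) with hrowdef
    set col : Int := ((board.headD []).length : Int) with hcoldef
    rw [hRows 0, hCols, hStart, List.foldl_append]
    -- A's diagonal loop, start column then top row
    rw [PySem.List.foldl_congr_mem
      ((PySem.List.pyRange 0 row 1).map (fun r => (r, (0 : Int)))) _
      (fun cnt rc => cnt + pvOcc (pvLineD board row col (rc.2 - rc.1)) word.toList) _
      (fun acc rc hrc => by
        obtain ⟨r, hr, rfl⟩ := List.mem_map.mp hrc
        have hr0 : 0 ≤ r := (PySem.List.mem_pyRange_one.mp hr).1
        show pvCountSlices (pvJoin (pvDiagWalk board row col r 0)) word.toList acc = _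
        rw [hWalk0 r hr0, pvCountSlices_eq _ _ hwe])]
    rw [PySem.List.foldl_add]
    rw [PySem.List.foldl_congr_mem
      ((PySem.List.pyRange 1 col 1).map (fun c => ((0 : Int), c))) _
      (fun cnt rc => cnt + pvOcc (pvLineD board row col (rc.2 - rc.1)) word.toList) _
      (fun acc rc hrc => by
        obtain ⟨c, hc, rfl⟩ := List.mem_map.mp hrc
        have hc0 : 0 ≤ c := by have := (PySem.List.mem_pyRange_one.mp hc).1; omega
        show pvCountSlices (pvJoin (pvDiagWalk board row col 0 c)) word.toList acc = _
        rw [hWalk1 c hc0, pvCountSlices_eq _ _ hwe])]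
    rw [PySem.List.foldl_add]
    rw [List.map_map, List.map_map]
    -- B's diagonal loop
    rw [show (fun (acc : List (List Char)) (d : Int) =>
          acc ++ [pvJoin ((PySem.List.pyRange (max 0 (-d)) (min row (col - d)) 1).map
            (fun r => pvCell board r (r + d)))])
        = (fun acc d => acc ++ [pvLineD board row col d]) from rfl]
    rw [PySem.List.foldl_append_singleton_eq_map]
    rw [pvZipStar_eq (board.headD []).length board hb hall rfl]
    simp only [List.map_append, List.sum_append, List.map_map, pvCountSuffixes_eq, zero_add,
      Function.comp_def, zero_sub, sub_zero]
    rw [← pvDiagSum_eq board word.toList row col hrow1]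
    ring
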